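-- pv_equiv track=rewrite | github.com/miliar/Code_Jam_Webscraper | solutions_python/Problem_199/3711.py | pb
-- ===== SOURCE A (Python) =====
-- def pb(series):
--     smart_pancakes=[]
--     check=0
--     j=0
--     while j < len(series):
--         if(series[j]=="+"):
--             smart_pancakes.append(1)
--             check+=1
--         elif(series[j]=="-"):
--             smart_pancakes.append(0)
--         else:
--             return smart_pancakes,j,check
--         j+=1
--     return smart_pancakes,j,check
-- ===== SOURCE B (Python) =====
-- def pb(series):
--     # Divide and conquer: combine results of the two halves; if the left half
--     # stopped before its end, its result is the whole answer.
--     def go(s):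
--         n = len(s)
--         if n == 0:
--             return [], 0, 0
--         if n == 1:
--             c = s[0]
--             if c == '+':
--                 return [1], 1, 1
--             if c == '-':
--                 return [0], 1, 0
--             return [], 0, 0
--         mid = n // 2
--         L, nl, kl = go(s[:mid])
--         if nl < mid:
--             return L, nl, kl
--         R, nr, kr = go(s[mid:])
--         return L + R, nl + nr, kl + kr
--     return go(series)
-- ===== Notes on version B (the rewrite author's own statement) =====
-- stated objective: alternative
-- what changed: A's single fused left-to-right while-loop with mutable list/counter state is replaced by a divide-and-conquer recursion that splits the string at the midpoint, solves each half, and either short-circuits on an early stop in the left half or concatenates/adds the two halves' results.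
import Mathlib
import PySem

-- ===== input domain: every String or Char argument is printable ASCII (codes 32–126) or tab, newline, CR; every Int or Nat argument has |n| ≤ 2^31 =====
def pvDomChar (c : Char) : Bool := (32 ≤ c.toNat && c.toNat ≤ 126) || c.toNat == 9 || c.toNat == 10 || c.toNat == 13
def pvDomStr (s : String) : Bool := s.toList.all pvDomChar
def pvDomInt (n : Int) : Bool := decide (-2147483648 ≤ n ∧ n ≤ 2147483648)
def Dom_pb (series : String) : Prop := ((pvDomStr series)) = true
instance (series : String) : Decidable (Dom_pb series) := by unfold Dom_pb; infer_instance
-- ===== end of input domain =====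

-- B replaces A's fused left-to-right while-loop by a divide-and-conquer recursion
-- (split at midpoint, combine, short-circuit on an early stop in the left half): alternative.


-- ===== PORT A =====
-- the while loop: state (smart_pancakes, check, j); early return on any other char
def pbLoop : List Char → List Int → Int → Int → (List Int × Int × Int)
  | [], acc, check, j => (acc, j, check)
  | c :: cs, acc, check, j =>
    if c = '+' then pbLoop cs (acc ++ [1]) (check + 1) (j + 1)
    else if c = '-' then pbLoop cs (acc ++ [0]) check (j + 1)
    else (acc, j, check)

def pb (series : String) : List Int × Int × Int :=
  pbLoop series.toList [] 0 0

-- ===== PORT B =====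
-- divide and conquer: split at mid = n // 2, solve halves, short-circuit or combine
def pbGo (s : List Char) : List Int × Int × Int :=
  if s.length ≤ 1 then
    match s with
    | [] => ([], 0, 0)
    | c :: _ => if c = '+' then ([1], 1, 1) else if c = '-' then ([0], 1, 0) else ([], 0, 0)
  else
    let mid := s.length / 2
    let (L, nl, kl) := pbGo (s.take mid)
    if nl < (mid : Int) then (L, nl, kl)
    else
      let (R, nr, kr) := pbGo (s.drop mid)
      (L ++ R, nl + nr, kl + kr)
termination_by s.length
decreasing_by
  · simp only [List.length_take]; omega
  · simp only [List.length_drop]; omega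

def pb_alt (series : String) : List Int × Int × Int :=
  pbGo series.toList

-- ===== PRECONDITION & SPEC =====
def Spec_pb (series : String) (out : List Int × Int × Int) : Prop := out = pb_alt series
instance (series : String) (out : List Int × Int × Int) : Decidable (Spec_pb series out) := by unfold Spec_pb; infer_instance

-- ===== CLAIM (what is proved, stated in full; the proofs are below) =====
def Claim_equal_pb : Prop := ∀ (series : String), Dom_pb series → Spec_pb series (pb series)

-- ===== LEMMAS AND PROOFS =====
def pvValid (c : Char) : Bool := c = '+' || c = '-'

def pvSpec (s : List Char) : List Int × Int × Int :=
  ((s.takeWhile pvValid).map (fun c => if c = '+' then (1 : Int) else 0),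
   ((s.takeWhile pvValid).length : Int),
   ((s.takeWhile pvValid).count '+' : Int))

theorem pbLoop_eq (cs : List Char) : ∀ (acc : List Int) (check j : Int),
    pbLoop cs acc check j =
      (acc ++ (cs.takeWhile pvValid).map (fun c => if c = '+' then (1 : Int) else 0),
       j + ((cs.takeWhile pvValid).length : Int),
       check + ((cs.takeWhile pvValid).count '+' : Int)) := by
  induction cs with
  | nil => intro acc check j; simp [pbLoop]
  | cons c cs ih =>
    intro acc check j
    by_cases hp : c = '+'
    · subst hp; simp [pbLoop, ih, List.takeWhile, pvValid]; omega
    · by_cases hm : c = '-'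
      · subst hm; simp [pbLoop, ih, List.takeWhile, pvValid]; omega
      · simp [pbLoop, hp, hm, List.takeWhile, pvValid]

theorem pbGo_eq (s : List Char) : pbGo s = pvSpec s := by
  rw [pbGo.eq_def]
  split
  · rename_i h
    match s with
    | [] => simp [pvSpec]
    | [c] =>
      by_cases hp : c = '+'
      · subst hp; simp [pvSpec, List.takeWhile, pvValid]
      · by_cases hm : c = '-'
        · subst hm; simp [pvSpec, List.takeWhile, pvValid]
        · simp [pvSpec, List.takeWhile, pvValid, hp, hm]
    | c :: d :: rest => simp at h
  · rename_i h
    have hGoL := pbGo_eq (s.take (s.length / 2))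
    have hGoR := pbGo_eq (s.drop (s.length / 2))
    simp only [hGoL, hGoR, pvSpec]
    have hmid : s.length / 2 ≤ s.length := Nat.div_le_self _ _
    have hlenA : (s.take (s.length / 2)).length = s.length / 2 := by
      simp [List.length_take]; omega
    have hle : ((s.take (s.length / 2)).takeWhile pvValid).length ≤ s.length / 2 := by
      have := (List.takeWhile_sublist (p := pvValid) (l := s.take (s.length / 2))).length_le
      omega
    have hsplit : s.takeWhile pvValid =
        if ((s.take (s.length / 2)).takeWhile pvValid).length = (s.take (s.length / 2)).length
        then s.take (s.length / 2) ++ (s.drop (s.length / 2)).takeWhile pvValid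
        else (s.take (s.length / 2)).takeWhile pvValid := by
      conv_lhs => rw [← List.take_append_drop (s.length / 2) s]
      exact List.takeWhile_append
    by_cases hcase : (((s.take (s.length / 2)).takeWhile pvValid).length : Int) < (s.length / 2 : Nat)
    · have hne : ¬ ((s.take (s.length / 2)).takeWhile pvValid).length = (s.take (s.length / 2)).length := by
        rw [hlenA]; omega
      rw [if_neg hne] at hsplit
      rw [if_pos hcase]
      simp [hsplit]
    · have heq : ((s.take (s.length / 2)).takeWhile pvValid).length = (s.take (s.length / 2)).length := by
        rw [hlenA]; omega
      have htwA : (s.take (s.length / 2)).takeWhile pvValid = s.take (s.length / 2) :=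
        (List.takeWhile_sublist (p := pvValid) (l := s.take (s.length / 2))).eq_of_length heq
      rw [if_pos heq] at hsplit
      rw [if_neg hcase]
      simp only [hsplit, htwA, List.map_append, List.length_append, List.count_append]
      push_cast
      rfl
termination_by s.length
decreasing_by
  · simp only [List.length_take]; omega
  · simp only [List.length_drop]; omega

-- ===== VERDICT (by name: the statement is the Claim_ definition above) =====
theorem pb_spec : Claim_equal_pb := by
  intro series _
  unfold Spec_pb pb pb_alt
  rw [pbGo_eq, pvSpec, pbLoop_eq]
  simp
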